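-- pv_equiv track=rewrite | github.com/luzgin-v/multigrid | methods.py | set_boundary_as_zero
-- ===== SOURCE A (Python) =====
-- def set_boundary_as_zero(inputArray, size_grid):
--     last_elem = size_grid - 1
--     for index in range(size_grid):
--         inputArray[0][index] = 0
--         inputArray[index][0] = 0
--         inputArray[last_elem][index] = 0
--         inputArray[index][last_elem] = 0
--     return inputArray
-- ===== SOURCE B (Python) =====
-- def set_boundary_as_zero(inputArray, size_grid):
--     # Row-wise: edge rows are zeroed wholesale, interior rows only at their two edge cells.
--     for i in range(size_grid):
--         if i == 0 or i == size_grid - 1: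
--             for j in range(size_grid):
--                 inputArray[i][j] = 0
--         else:
--             inputArray[i][0] = 0
--             inputArray[i][size_grid - 1] = 0
--     return inputArray
-- ===== Notes on version B (the rewrite author's own statement) =====
-- stated objective: simpler
-- what changed: Row-wise traversal with a branch (whole first/last row zeroed by an inner loop, interior rows only at columns 0 and size_grid-1) instead of four simultaneous edge writes per index; each boundary cell is written once instead of up to four times.
import Mathlib
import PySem

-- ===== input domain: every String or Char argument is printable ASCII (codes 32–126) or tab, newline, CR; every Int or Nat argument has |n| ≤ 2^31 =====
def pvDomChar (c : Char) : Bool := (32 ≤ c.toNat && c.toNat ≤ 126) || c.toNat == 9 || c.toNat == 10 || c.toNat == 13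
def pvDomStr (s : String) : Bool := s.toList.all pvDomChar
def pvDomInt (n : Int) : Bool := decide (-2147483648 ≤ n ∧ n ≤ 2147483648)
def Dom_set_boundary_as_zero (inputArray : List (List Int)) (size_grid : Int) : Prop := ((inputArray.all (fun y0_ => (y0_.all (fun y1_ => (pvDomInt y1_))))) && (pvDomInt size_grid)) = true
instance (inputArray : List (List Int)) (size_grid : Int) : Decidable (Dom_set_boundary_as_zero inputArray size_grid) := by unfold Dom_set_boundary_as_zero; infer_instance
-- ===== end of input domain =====

-- B zeroes the same boundary cells by a row-wise branch (whole edge rows, two cells per interior row)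
-- instead of A's four simultaneous edge writes per index; equivalence is about the RETURN value
-- (both Pythons mutate inputArray in place in the same way).

-- `g[i][j] = 0` on a list-of-lists (indices already nonnegative; out of range = Python raise, excluded by Pre_)
def pvSetAt (g : List (List Int)) (i j : Nat) : List (List Int) :=
  g.set i ((g.getD i []).set j 0)

-- ===== PORT A =====
def set_boundary_as_zero (inputArray : List (List Int)) (size_grid : Int) : List (List Int) :=
  let last_elem := size_grid - 1
  (PySem.List.pyRange 0 size_grid 1).foldl (fun g index =>
    let g1 := pvSetAt g 0 index.toNat
    let g2 := pvSetAt g1 index.toNat 0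
    let g3 := pvSetAt g2 last_elem.toNat index.toNat
    pvSetAt g3 index.toNat last_elem.toNat) inputArray

-- ===== PORT B =====
def set_boundary_as_zero_alt (inputArray : List (List Int)) (size_grid : Int) : List (List Int) :=
  (PySem.List.pyRange 0 size_grid 1).foldl (fun g i =>
    if i = 0 ∨ i = size_grid - 1 then
      (PySem.List.pyRange 0 size_grid 1).foldl (fun g j => pvSetAt g i.toNat j.toNat) g
    else
      pvSetAt (pvSetAt g i.toNat 0) i.toNat (size_grid - 1).toNat) inputArray

-- ===== PRECONDITION & SPEC =====
-- Pre_ excludes exactly the inputs on which the Python A raises IndexError: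
-- a positive size_grid larger than the number of rows, or a row among the first size_grid shorter than size_grid.
def Pre_set_boundary_as_zero (inputArray : List (List Int)) (size_grid : Int) : Prop :=
  size_grid ≤ 0 ∨ (size_grid ≤ (inputArray.length : Int) ∧
    ∀ row ∈ inputArray.take size_grid.toNat, size_grid ≤ (row.length : Int))
instance (inputArray : List (List Int)) (size_grid : Int) : Decidable (Pre_set_boundary_as_zero inputArray size_grid) := by unfold Pre_set_boundary_as_zero; infer_instance

def pvWitness_set_boundary_as_zero : List (List Int) × Int := ([[1, 2, 3], [4, 5, 6], [7, 8, 9]], 3)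

def Spec_set_boundary_as_zero (inputArray : List (List Int)) (size_grid : Int) (out : List (List Int)) : Prop := out = set_boundary_as_zero_alt inputArray size_grid
instance (inputArray : List (List Int)) (size_grid : Int) (out : List (List Int)) : Decidable (Spec_set_boundary_as_zero inputArray size_grid out) := by unfold Spec_set_boundary_as_zero; infer_instance

-- ===== CLAIM (what is proved, stated in full; the proofs are below) =====
def Claim_equal_set_boundary_as_zero : Prop := ∀ (inputArray : List (List Int)) (size_grid : Int), Dom_set_boundary_as_zero inputArray size_grid → Pre_set_boundary_as_zero inputArray size_grid → Spec_set_boundary_as_zero inputArray size_grid (set_boundary_as_zero inputArray size_grid)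

-- ===== LEMMAS AND PROOFS =====

def pvRlen (g : List (List Int)) (a : Nat) : Nat := (g.getD a []).length
def pvCell (g : List (List Int)) (a b : Nat) : Int := (g.getD a []).getD b 0

-- apply a list of writes "cell := 0"
def pvApply (g : List (List Int)) (w : List (Nat × Nat)) : List (List Int) :=
  w.foldl (fun G p => pvSetAt G p.1 p.2) g

theorem pv_getD_set {α : Type} (g : List α) (i : Nat) (r : α) (a : Nat) (d : α) :
    (g.set i r).getD a d = if a = i ∧ i < g.length then r else g.getD a d := by
  by_cases h1 : a = i
  · subst h1
    by_cases h2 : a < g.length <;>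
      simp [List.getD_eq_getElem?_getD, h2]
  · have h1' : ¬ i = a := fun h => h1 h.symm
    simp [List.getD_eq_getElem?_getD, h1, h1']

theorem length_pvSetAt (g : List (List Int)) (i j : Nat) :
    (pvSetAt g i j).length = g.length := by simp [pvSetAt]

theorem rlen_pvSetAt (g : List (List Int)) (i j a : Nat) :
    pvRlen (pvSetAt g i j) a = pvRlen g a := by
  simp only [pvRlen, pvSetAt, pv_getD_set]
  split_ifs with h
  · rcases h with ⟨rfl, _⟩; simp
  · rfl

theorem cell_pvSetAt (g : List (List Int)) (i j a b : Nat) :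
    pvCell (pvSetAt g i j) a b =
      if a = i ∧ b = j ∧ i < g.length ∧ j < pvRlen g i then 0 else pvCell g a b := by
  unfold pvCell pvSetAt pvRlen
  rw [pv_getD_set]
  by_cases h : a = i ∧ i < g.length
  · rw [if_pos h]
    rcases h with ⟨rfl, hil⟩
    rw [pv_getD_set]
    by_cases h2 : b = j ∧ j < (g.getD a []).length
    · rw [if_pos h2, if_pos ⟨rfl, h2.1, hil, h2.2⟩]
    · rw [if_neg h2, if_neg (fun hc => h2 ⟨hc.2.1, hc.2.2.2⟩)]
  · rw [if_neg h, if_neg (fun hc : a = i ∧ b = j ∧ i < g.length ∧ j < (g.getD i []).length => h ⟨hc.1, hc.2.2.1⟩)]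

theorem length_pvApply (g : List (List Int)) (w : List (Nat × Nat)) :
    (pvApply g w).length = g.length := by
  induction w generalizing g with
  | nil => rfl
  | cons p rest ih => simp [pvApply, List.foldl_cons] at *; rw [ih, length_pvSetAt]

theorem rlen_pvApply (g : List (List Int)) (w : List (Nat × Nat)) (a : Nat) :
    pvRlen (pvApply g w) a = pvRlen g a := by
  induction w generalizing g with
  | nil => rfl
  | cons p rest ih => simp [pvApply, List.foldl_cons] at *; rw [ih, rlen_pvSetAt]

theorem cell_pvApply (g : List (List Int)) (w : List (Nat × Nat))
    (hw : ∀ p ∈ w, p.1 < g.length ∧ p.2 < pvRlen g p.1) (a b : Nat) :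
    pvCell (pvApply g w) a b = if (a, b) ∈ w then 0 else pvCell g a b := by
  induction w generalizing g with
  | nil => simp [pvApply]
  | cons p rest ih =>
    have hp := hw p (List.mem_cons_self ..)
    have hrest : ∀ q ∈ rest, q.1 < (pvSetAt g p.1 p.2).length ∧ q.2 < pvRlen (pvSetAt g p.1 p.2) q.1 := by
      intro q hq
      rw [length_pvSetAt, rlen_pvSetAt]
      exact hw q (List.mem_cons_of_mem _ hq)
    have : pvApply g (p :: rest) = pvApply (pvSetAt g p.1 p.2) rest := by
      simp [pvApply, List.foldl_cons]
    rw [this, ih _ hrest, cell_pvSetAt]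
    by_cases h1 : (a, b) ∈ rest
    · simp [h1]
    · by_cases h2 : (a, b) = p
      · rcases h2 with rfl
        simp [hp.1, hp.2, List.mem_cons]
      · have hne : ¬(a = p.1 ∧ b = p.2 ∧ p.1 < g.length ∧ p.2 < pvRlen g p.1) := by
          rintro ⟨h3, h4, -⟩; exact h2 (by cases p; simp_all)
        simp [h1, hne, List.mem_cons, h2]

-- the iterated loop: foldl over List.range K applying w k at iteration k
theorem length_foldRange (g : List (List Int)) (w : Nat → List (Nat × Nat)) (K : Nat) :
    ((List.range K).foldl (fun G k => pvApply G (w k)) g).length = g.length := by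
  induction K with
  | zero => rfl
  | succ K ih => rw [List.range_succ, List.foldl_append, List.foldl_cons, List.foldl_nil,
      length_pvApply, ih]

theorem rlen_foldRange (g : List (List Int)) (w : Nat → List (Nat × Nat)) (K a : Nat) :
    pvRlen ((List.range K).foldl (fun G k => pvApply G (w k)) g) a = pvRlen g a := by
  induction K with
  | zero => rfl
  | succ K ih => rw [List.range_succ, List.foldl_append, List.foldl_cons, List.foldl_nil,
      rlen_pvApply, ih]

theorem cell_foldRange (g : List (List Int)) (w : Nat → List (Nat × Nat)) (K : Nat)
    (hw : ∀ k < K, ∀ p ∈ w k, p.1 < g.length ∧ p.2 < pvRlen g p.1) (a b : Nat) :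
    pvCell ((List.range K).foldl (fun G k => pvApply G (w k)) g) a b =
      if ∃ k, k < K ∧ (a, b) ∈ w k then 0 else pvCell g a b := by
  induction K with
  | zero => simp
  | succ K ih =>
    rw [List.range_succ, List.foldl_append, List.foldl_cons, List.foldl_nil]
    have hwK : ∀ p ∈ w K, p.1 < ((List.range K).foldl (fun G k => pvApply G (w k)) g).length ∧
        p.2 < pvRlen ((List.range K).foldl (fun G k => pvApply G (w k)) g) p.1 := by
      intro p hp
      rw [length_foldRange, rlen_foldRange]
      exact hw K (Nat.lt_succ_self K) p hp
    rw [cell_pvApply _ _ hwK, ih (fun k hk => hw k (Nat.lt_succ_of_lt hk))]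
    by_cases h1 : (a, b) ∈ w K
    · simp only [if_pos h1]
      rw [if_pos ⟨K, Nat.lt_succ_self K, h1⟩]
    · rw [if_neg h1]
      by_cases h2 : ∃ k, k < K ∧ (a, b) ∈ w k
      · rcases h2 with ⟨k, hk, hm⟩
        rw [if_pos ⟨k, hk, hm⟩, if_pos ⟨k, Nat.lt_succ_of_lt hk, hm⟩]
      · rw [if_neg h2, if_neg]
        rintro ⟨k, hk, hm⟩
        rcases Nat.lt_succ_iff_lt_or_eq.mp hk with hk' | heq
        · exact h2 ⟨k, hk', hm⟩
        · subst heq; exact h1 hm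

-- lists with equal lengths and equal getD at every index are equal
theorem pv_getD_ext {α : Type} (d : α) {G H : List α} (hlen : G.length = H.length)
    (h : ∀ a, G.getD a d = H.getD a d) : G = H := by
  apply List.ext_getElem hlen
  intro i h1 h2
  have := h i
  rwa [List.getD_eq_getElem?_getD, List.getD_eq_getElem?_getD,
    List.getElem?_eq_getElem h1, List.getElem?_eq_getElem h2, Option.getD_some, Option.getD_some] at this

theorem pv_grid_ext {G H : List (List Int)} (hlen : G.length = H.length)
    (hr : ∀ a, pvRlen G a = pvRlen H a) (hc : ∀ a b, pvCell G a b = pvCell H a b) : G = H := by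
  apply pv_getD_ext [] hlen
  intro a
  exact pv_getD_ext 0 (hr a) (hc a)

-- write lists of the two programs, one iteration each
def pvWA (N k : Nat) : List (Nat × Nat) := [(0, k), (k, 0), (N - 1, k), (k, N - 1)]
def pvWB (N k : Nat) : List (Nat × Nat) :=
  if k = 0 ∨ k = N - 1 then (List.range N).map (fun j => (k, j)) else [(k, 0), (k, N - 1)]

theorem memWA (N k a b : Nat) : ((a, b) ∈ pvWA N k) ↔
    (a = 0 ∧ b = k) ∨ (a = k ∧ b = 0) ∨ (a = N - 1 ∧ b = k) ∨ (a = k ∧ b = N - 1) := by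
  simp [pvWA, Prod.ext_iff]

theorem memWB (N k a b : Nat) : ((a, b) ∈ pvWB N k) ↔
    (if k = 0 ∨ k = N - 1 then a = k ∧ b < N else a = k ∧ (b = 0 ∨ b = N - 1)) := by
  unfold pvWB
  split_ifs with h
  · simp [Prod.ext_iff, eq_comm, List.mem_range, and_comm]
  · simp only [List.mem_cons, Prod.ext_iff]
    tauto

theorem set_boundary_as_zero_spec' (g : List (List Int)) (n : Int)
    (hPre : Pre_set_boundary_as_zero g n) :
    set_boundary_as_zero g n = set_boundary_as_zero_alt g n := by
  by_cases hn : n ≤ 0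
  · rw [set_boundary_as_zero, set_boundary_as_zero_alt, PySem.List.pyRange_one_eq_nil (by omega)]
    simp
  · replace hn : 0 < n := by omega
    rcases hPre with h | ⟨hlen, hrow⟩
    · omega
    set N := n.toNat with hN
    have hN1 : 1 ≤ N := by omega
    have hLg : N ≤ g.length := by omega
    have hRg : ∀ a, a < N → N ≤ pvRlen g a := by
      intro a ha
      have hag : a < g.length := lt_of_lt_of_le ha hLg
      have hmem : g[a] ∈ g.take n.toNat := by
        rw [List.mem_take_iff_getElem]
        exact ⟨a, by omega, rfl⟩
      have := hrow _ hmem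
      have hD : pvRlen g a = g[a].length := by
        simp [pvRlen, List.getD_eq_getElem?_getD, List.getElem?_eq_getElem hag]
      omega
    -- rewrite port A as a foldRange over pvWA
    have hA : set_boundary_as_zero g n = (List.range N).foldl (fun G k => pvApply G (pvWA N k)) g := by
      rw [set_boundary_as_zero, PySem.List.pyRange_one, List.foldl_map]
      have : (n - 0).toNat = N := by omega
      rw [this]
      congr 1
      funext G k
      have h0 : ((0 : Int) + (k : Int)).toNat = k := by omega
      have h1 : (n - 1).toNat = N - 1 := by omega
      simp [pvApply, pvWA, h1]
    -- rewrite port B as a foldRange over pvWB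
    have hB : set_boundary_as_zero_alt g n = (List.range N).foldl (fun G k => pvApply G (pvWB N k)) g := by
      rw [set_boundary_as_zero_alt, PySem.List.pyRange_one, List.foldl_map]
      have hnn : (n - 0).toNat = N := by omega
      rw [hnn]
      congr 1
      funext G k
      have h0 : ((0 : Int) + (k : Int)).toNat = k := by omega
      have h1 : (n - 1).toNat = N - 1 := by omega
      have hcond : ((0 : Int) + (k : Int) = 0 ∨ (0 : Int) + (k : Int) = n - 1) ↔ (k = 0 ∨ k = N - 1) := by omega
      by_cases hk : k = 0 ∨ k = N - 1
      · rw [if_pos (hcond.mpr hk)]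
        unfold pvWB pvApply
        rw [if_pos hk, List.foldl_map, List.foldl_map]
        congr 1
        funext G' j
        have hj : ((0 : Int) + (j : Int)).toNat = j := by omega
        rw [hj, h0]
      · rw [if_neg (fun h => hk (hcond.mp h))]
        unfold pvWB
        rw [if_neg hk]
        simp [pvApply, h1]
    -- bounds for all writes
    have hwA : ∀ k < N, ∀ p ∈ pvWA N k, p.1 < g.length ∧ p.2 < pvRlen g p.1 := by
      intro k hk p hp
      have hm := (memWA N k p.1 p.2).mp (by simpa using hp)
      have e1 : p.1 < N := by omega
      have := hRg p.1 e1
      constructor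
      · omega
      · omega
    have hwB : ∀ k < N, ∀ p ∈ pvWB N k, p.1 < g.length ∧ p.2 < pvRlen g p.1 := by
      intro k hk p hp
      have hm := (memWB N k p.1 p.2).mp (by simpa using hp)
      split_ifs at hm with h
      · have e1 : p.1 < N := by omega
        have := hRg p.1 e1
        constructor
        · omega
        · omega
      · have e1 : p.1 < N := by omega
        have := hRg p.1 e1
        constructor
        · omega
        · omega
    rw [hA, hB]
    -- both sides have the same lengths, row lengths, and cells
    apply pv_grid_ext
    · rw [length_foldRange, length_foldRange]
    · intro a; rw [rlen_foldRange, rlen_foldRange]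
    · intro a b
      rw [cell_foldRange g _ N hwA a b, cell_foldRange g _ N hwB a b]
      have hSA : (∃ k, k < N ∧ (a, b) ∈ pvWA N k) ↔
          (a < N ∧ b < N ∧ (a = 0 ∨ b = 0 ∨ a = N - 1 ∨ b = N - 1)) := by
        constructor
        · rintro ⟨k, hk, hm⟩
          have := (memWA N k a b).mp hm
          omega
        · rintro ⟨ha, hb, hor⟩
          rcases hor with h | h | h | h
          · exact ⟨b, hb, (memWA N b a b).mpr (Or.inl ⟨h, rfl⟩)⟩
          · exact ⟨a, ha, (memWA N a a b).mpr (Or.inr (Or.inl ⟨rfl, h⟩))⟩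
          · exact ⟨b, hb, (memWA N b a b).mpr (Or.inr (Or.inr (Or.inl ⟨h, rfl⟩)))⟩
          · exact ⟨a, ha, (memWA N a a b).mpr (Or.inr (Or.inr (Or.inr ⟨rfl, h⟩)))⟩
      have hSB : (∃ k, k < N ∧ (a, b) ∈ pvWB N k) ↔
          (a < N ∧ b < N ∧ (a = 0 ∨ b = 0 ∨ a = N - 1 ∨ b = N - 1)) := by
        constructor
        · rintro ⟨k, hk, hm⟩
          have := (memWB N k a b).mp hm
          split_ifs at this with h <;> omega
        · rintro ⟨ha, hb, hor⟩
          refine ⟨a, ha, (memWB N a a b).mpr ?_⟩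
          by_cases h : a = 0 ∨ a = N - 1
          · rw [if_pos h]; exact ⟨rfl, hb⟩
          · rw [if_neg h]; exact ⟨rfl, by omega⟩
      by_cases hS : a < N ∧ b < N ∧ (a = 0 ∨ b = 0 ∨ a = N - 1 ∨ b = N - 1)
      · rw [if_pos (hSA.mpr hS), if_pos (hSB.mpr hS)]
      · rw [if_neg (fun hx => hS (hSA.mp hx)), if_neg (fun hx => hS (hSB.mp hx))]

-- ===== VERDICT (by name: the statement is the Claim_ definition above) =====
theorem set_boundary_as_zero_spec : Claim_equal_set_boundary_as_zero := by
  intro inputArray size_grid _ hPre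
  exact set_boundary_as_zero_spec' inputArray size_grid hPre
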